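-- pv_equiv track=rewrite | github.com/HabsaTheDog/Trainscanner | scripts/qa/prepare-motis-k8s-artifacts.py | add_parent_and_child_stops
-- ===== SOURCE A (Python) =====
-- def normalize_stop_id(raw: str | None) -> str:
--     return (raw or "").strip()
--
-- def index_rows(rows: list[dict[str, str]], key: str) -> dict[str, dict[str, str]]:
--     out: dict[str, dict[str, str]] = {}
--     for row in rows:
--         value = (row.get(key) or "").strip()
--         if value:
--             out[value] = row
--     return out
--
-- def _add_missing_parents(
--     keep: set[str],
--     rows_by_id: dict[str, dict[str, str]],
-- ) -> bool:
--     changed = False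
--     for stop_id in keep.copy():
--         row = rows_by_id.get(stop_id)
--         if not row:
--             continue
--         parent = normalize_stop_id(row.get("parent_station"))
--         if parent and parent not in keep:
--             keep.add(parent)
--             changed = True
--     return changed
--
-- def _add_missing_children(keep: set[str], stops_rows: list[dict[str, str]]) -> bool:
--     changed = False
--     for row in stops_rows:
--         stop_id = normalize_stop_id(row.get("stop_id"))
--         parent = normalize_stop_id(row.get("parent_station"))
--         if parent and parent in keep and stop_id not in keep:
--             keep.add(stop_id)
--             changed = True
--     return changed
--
-- def add_parent_and_child_stops(
--     initial_ids: set[str],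
--     stops_rows: list[dict[str, str]],
-- ) -> set[str]:
--     rows_by_id = index_rows(stops_rows, "stop_id")
--     keep = set(initial_ids)
--
--     while True:
--         changed = _add_missing_parents(keep, rows_by_id)
--         changed = _add_missing_children(keep, stops_rows) or changed
--         if not changed:
--             break
--     return keep
-- ===== SOURCE B (Python) =====
-- def add_parent_and_child_stops(initial_ids, stops_rows):
--     # Semi-naive fixpoint: one normalization pass builds a stop_id->parent map and a
--     # pending edge list; each round scans only the frontier of newly-added ids (for
--     # parents) and the still-unfired edges (for children).
--     parent_of = {}
--     pending = []
--     for row in stops_rows: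
--         sid = (row.get("stop_id") or "").strip()
--         par = (row.get("parent_station") or "").strip()
--         if sid:
--             parent_of[sid] = par
--         if par:
--             pending.append((par, sid))
--     keep = set(initial_ids)
--     frontier = list(keep)
--     while True:
--         new_frontier = []
--         for x in frontier:
--             p = parent_of.get(x)
--             if p and p not in keep:
--                 keep.add(p)
--                 new_frontier.append(p)
--         still = []
--         for par, sid in pending:
--             if par in keep:
--                 if sid not in keep:
--                     keep.add(sid)
--                     new_frontier.append(sid)
--             else:
--                 still.append((par, sid))
--         pending = still
--         if not new_frontier:
--             break
--         frontier = new_frontier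
--     return keep
-- ===== Notes on version B (the rewrite author's own statement) =====
-- stated objective: alternative
-- what changed: A re-scans the whole keep set and every row (re-stripping all fields and re-querying the row index) on every round of a naive fixpoint; B normalizes each row once into a stop_id->parent map plus a pending edge list, then runs a semi-naive worklist that each round scans only the frontier of newly added ids and the still-unfired edges, dropping fired edges for good.
import Mathlib
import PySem

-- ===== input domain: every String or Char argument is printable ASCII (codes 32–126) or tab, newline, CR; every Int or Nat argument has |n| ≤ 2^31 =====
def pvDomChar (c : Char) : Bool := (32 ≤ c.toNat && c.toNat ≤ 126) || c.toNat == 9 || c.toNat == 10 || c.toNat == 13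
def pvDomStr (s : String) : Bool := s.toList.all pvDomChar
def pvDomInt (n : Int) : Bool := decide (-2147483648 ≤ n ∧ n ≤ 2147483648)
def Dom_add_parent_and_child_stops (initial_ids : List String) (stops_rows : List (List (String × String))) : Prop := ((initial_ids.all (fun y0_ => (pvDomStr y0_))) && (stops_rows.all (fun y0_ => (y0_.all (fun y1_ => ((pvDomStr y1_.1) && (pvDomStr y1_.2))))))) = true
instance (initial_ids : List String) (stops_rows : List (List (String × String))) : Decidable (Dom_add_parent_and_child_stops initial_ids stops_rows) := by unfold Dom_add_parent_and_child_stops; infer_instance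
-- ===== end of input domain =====

-- B replaces A's naive re-scan-everything fixpoint by a semi-naive worklist (one normalization
-- pass building a parent map and a pending edge list, then per-round frontier/pending sweeps).


-- ===== PORT A =====
-- normalize_stop_id(raw): (raw or "").strip()
def normalize_stop_id (raw : Option String) : String :=
  PySem.Str.strip (raw.getD "")

-- index_rows(rows, key)
def index_rows (rows : List (List (String × String))) (key : String) :
    PySem.Dict String (List (String × String)) :=
  rows.foldl (fun out row =>
    let value := PySem.Str.strip (((PySem.Dict.mk row).get? key).getD "")
    if value ≠ "" then out.insert value row else out) PySem.Dict.empty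

-- loop body of _add_missing_parents (state: live keep set, changed flag)
def stepAP (rows_by_id : PySem.Dict String (List (String × String)))
    (st : PySem.Set String × Bool) (stop_id : String) : PySem.Set String × Bool :=
  match rows_by_id.get? stop_id with
  | none => st
  | some row =>
    if row = [] then st   -- "if not row: continue" (empty dict)
    else
      let parent := normalize_stop_id ((PySem.Dict.mk row).get? "parent_station")
      if parent ≠ "" ∧ parent ∉ st.1 then (PySem.Set.add st.1 parent, true) else st

-- _add_missing_parents(keep, rows_by_id): iterates keep.copy() (the snapshot list) while
-- membership tests/additions use the live, growing set.
def addMissingParentsA (keep : PySem.Set String)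
    (rows_by_id : PySem.Dict String (List (String × String))) : PySem.Set String × Bool :=
  keep.foldl (stepAP rows_by_id) (keep, false)

-- loop body of _add_missing_children
def stepAC (st : PySem.Set String × Bool) (row : List (String × String)) :
    PySem.Set String × Bool :=
  let stop_id := normalize_stop_id ((PySem.Dict.mk row).get? "stop_id")
  let parent := normalize_stop_id ((PySem.Dict.mk row).get? "parent_station")
  if parent ≠ "" ∧ parent ∈ st.1 ∧ stop_id ∉ st.1 then (PySem.Set.add st.1 stop_id, true) else st

def addMissingChildrenA (keep : PySem.Set String)
    (stops_rows : List (List (String × String))) : PySem.Set String × Bool :=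
  stops_rows.foldl stepAC (keep, false)

-- the "while True" loop; fuel 2*len(rows)+1 always suffices: every continuing round has added
-- at least one new id, and at most 2*len(rows) ids can ever be added (one parent value and one
-- stop_id value per row, each addable only once).
def loopA (fuel : Nat) (rows_by_id : PySem.Dict String (List (String × String)))
    (stops_rows : List (List (String × String))) (keep : PySem.Set String) : PySem.Set String :=
  match fuel with
  | 0 => keep
  | Nat.succ fuel =>
    let s1 := addMissingParentsA keep rows_by_id
    let s2 := addMissingChildrenA s1.1 stops_rows
    if s2.2 || s1.2 then loopA fuel rows_by_id stops_rows s2.1 else s2.1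

def add_parent_and_child_stops (initial_ids : List String)
    (stops_rows : List (List (String × String))) : List String :=
  let rows_by_id := index_rows stops_rows "stop_id"
  let keep := PySem.Set.ofList initial_ids
  loopA (2 * stops_rows.length + 1) rows_by_id stops_rows keep

-- ===== PORT B =====
-- body of B's single normalization pass: stop_id -> stripped parent map, pending edge list
def stepBM (acc : PySem.Dict String String × List (String × String))
    (row : List (String × String)) : PySem.Dict String String × List (String × String) :=
  let sid := PySem.Str.strip (((PySem.Dict.mk row).get? "stop_id").getD "")
  let par := PySem.Str.strip (((PySem.Dict.mk row).get? "parent_station").getD "")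
  (if sid ≠ "" then acc.1.insert sid par else acc.1,
   if par ≠ "" then acc.2 ++ [(par, sid)] else acc.2)

def buildMapsB (stops_rows : List (List (String × String))) :
    PySem.Dict String String × List (String × String) :=
  stops_rows.foldl stepBM (PySem.Dict.empty, [])

-- "for x in frontier: ..." — state (keep, new_frontier)
def stepBP (parent_of : PySem.Dict String String)
    (st : PySem.Set String × List String) (x : String) : PySem.Set String × List String :=
  match parent_of.get? x with
  | none => st
  | some p => if p ≠ "" ∧ p ∉ st.1 then (PySem.Set.add st.1 p, st.2 ++ [p]) else st

def parentsSweepB (parent_of : PySem.Dict String String)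
    (st : PySem.Set String × List String) (frontier : List String) :
    PySem.Set String × List String :=
  frontier.foldl (stepBP parent_of) st

-- "for par, sid in pending: ..." — state (keep, new_frontier, still)
def stepBC (st : PySem.Set String × List String × List (String × String))
    (e : String × String) : PySem.Set String × List String × List (String × String) :=
  if e.1 ∈ st.1 then
    if e.2 ∉ st.1 then (PySem.Set.add st.1 e.2, st.2.1 ++ [e.2], st.2.2) else st
  else (st.1, st.2.1, st.2.2 ++ [e])

def childrenSweepB (st : PySem.Set String × List String × List (String × String))
    (pending : List (String × String)) :
    PySem.Set String × List String × List (String × String) :=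
  pending.foldl stepBC st

def loopB (fuel : Nat) (parent_of : PySem.Dict String String) (keep : PySem.Set String)
    (frontier : List String) (pending : List (String × String)) : PySem.Set String :=
  match fuel with
  | 0 => keep
  | Nat.succ fuel =>
    let s1 := parentsSweepB parent_of (keep, []) frontier
    let s2 := childrenSweepB (s1.1, s1.2, []) pending
    if s2.2.1 = [] then s2.1
    else loopB fuel parent_of s2.1 s2.2.1 s2.2.2

def add_parent_and_child_stops_alt (initial_ids : List String)
    (stops_rows : List (List (String × String))) : List String :=
  let maps := buildMapsB stops_rows
  let keep := PySem.Set.ofList initial_ids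
  loopB (2 * stops_rows.length + 1) maps.1 keep keep maps.2

-- ===== PRECONDITION & SPEC =====
def Spec_add_parent_and_child_stops (initial_ids : List String) (stops_rows : List (List (String × String))) (out : List String) : Prop := out = add_parent_and_child_stops_alt initial_ids stops_rows
instance (initial_ids : List String) (stops_rows : List (List (String × String))) (out : List String) : Decidable (Spec_add_parent_and_child_stops initial_ids stops_rows out) := by unfold Spec_add_parent_and_child_stops; infer_instance

-- ===== CLAIM (what is proved, stated in full; the proofs are below) =====
def Claim_equal_add_parent_and_child_stops : Prop := ∀ (initial_ids : List String) (stops_rows : List (List (String × String))), Dom_add_parent_and_child_stops initial_ids stops_rows → Spec_add_parent_and_child_stops initial_ids stops_rows (add_parent_and_child_stops initial_ids stops_rows)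

-- ===== LEMMAS AND PROOFS =====

-- x cannot contribute a new parent at keep-state k
def ParDone (pm : PySem.Dict String String) (k : PySem.Set String) (x : String) : Prop :=
  ∀ p, pm.get? x = some p → p = "" ∨ p ∈ k

-- positional relation between the full edge list L (A re-scans it every round) and B's
-- surviving pending list Q: every edge dropped from Q already has its stop_id in keep
def PendRel (k : PySem.Set String) : List (String × String) → List (String × String) → Prop
  | [], Q => Q = []
  | e :: L, Q => (e.2 ∈ k ∧ PendRel k L Q) ∨ (∃ Q', Q = e :: Q' ∧ PendRel k L Q')

theorem pendRel_refl (k : PySem.Set String) (L : List (String × String)) : PendRel k L L := by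
  induction L with
  | nil => rfl
  | cons e L ih => exact Or.inr ⟨L, rfl, ih⟩

theorem pendRel_mono {k k' : PySem.Set String} (hk : ∀ x, x ∈ k → x ∈ k')
    {L Q : List (String × String)} (h : PendRel k L Q) : PendRel k' L Q := by
  induction L generalizing Q with
  | nil => exact h
  | cons e L ih =>
    rcases h with ⟨he, h⟩ | ⟨Q', rfl, h⟩
    · exact Or.inl ⟨hk _ he, ih h⟩
    · exact Or.inr ⟨Q', rfl, ih h⟩

-- the pending-list component of the normalization pass ignores the dict and accumulates
theorem bm_snd (rows : List (List (String × String)))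
    (m m' : PySem.Dict String String) (p : List (String × String)) :
    (rows.foldl stepBM (m, p)).2 = p ++ (rows.foldl stepBM (m', [])).2 := by
  induction rows generalizing m m' p with
  | nil => simp
  | cons row rows ih =>
    simp only [List.foldl_cons]
    by_cases h : PySem.Str.strip (((PySem.Dict.mk row).get? "parent_station").getD "") = ""
    · simp only [stepBM, h, ne_eq, not_true_eq_false, if_false]
      exact ih _ _ _
    · simp only [stepBM, if_pos h]
      rw [ih _ m, ih (p := [] ++ [_]) _ m]
      simp

-- the parent lookup A performs through rows_by_id equals B's precomputed map
theorem lookup_eq (rows : List (List (String × String))) (x : String) :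
    (match (index_rows rows "stop_id").get? x with
     | none => none
     | some row =>
       if row = [] then none
       else some (normalize_stop_id ((PySem.Dict.mk row).get? "parent_station")))
    = (buildMapsB rows).1.get? x := by
  induction rows using List.reverseRecOn with
  | nil => simp [index_rows, buildMapsB, PySem.Dict.empty, PySem.Dict.get?]
  | append_singleton rows row ih =>
    have hA : index_rows (rows ++ [row]) "stop_id"
        = (let value := PySem.Str.strip (((PySem.Dict.mk row).get? "stop_id").getD "")
           if value ≠ "" then (index_rows rows "stop_id").insert value row
           else index_rows rows "stop_id") := by
      simp [index_rows, List.foldl_append]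
    have hB : (buildMapsB (rows ++ [row])).1
        = (let sid := PySem.Str.strip (((PySem.Dict.mk row).get? "stop_id").getD "")
           let par := PySem.Str.strip (((PySem.Dict.mk row).get? "parent_station").getD "")
           if sid ≠ "" then (buildMapsB rows).1.insert sid par else (buildMapsB rows).1) := by
      simp [buildMapsB, List.foldl_append, stepBM]
    rw [hA, hB]
    simp only []
    by_cases hs : PySem.Str.strip (((PySem.Dict.mk row).get? "stop_id").getD "") = ""
    · simp only [hs, ne_eq, not_true_eq_false, if_false]
      exact ih
    · simp only [ne_eq, hs, not_false_eq_true, if_true]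
      by_cases hx : x = PySem.Str.strip (((PySem.Dict.mk row).get? "stop_id").getD "")
      · rw [hx, PySem.Dict.get?_insert_self, PySem.Dict.get?_insert_self]
        have hrow : row ≠ [] := by
          intro h; subst h
          apply hs
          rfl
        simp [hrow, normalize_stop_id]
      · rw [PySem.Dict.get?_insert_of_ne _ _ hx, PySem.Dict.get?_insert_of_ne _ _ hx]
        exact ih

theorem parentsSweepB_cons (pm : PySem.Dict String String) (st : PySem.Set String × List String)
    (x : String) (f : List String) :
    parentsSweepB pm st (x :: f) = parentsSweepB pm (stepBP pm st x) f := rfl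

theorem childrenSweepB_cons (st : PySem.Set String × List String × List (String × String))
    (e : String × String) (Q : List (String × String)) :
    childrenSweepB st (e :: Q) = childrenSweepB (stepBC st e) Q := rfl

-- accumulator laws and monotonicity of the sweeps
theorem ps_acc (pm : PySem.Dict String String) (f : List String)
    (k : PySem.Set String) (ns : List String) :
    parentsSweepB pm (k, ns) f
      = ((parentsSweepB pm (k, []) f).1, ns ++ (parentsSweepB pm (k, []) f).2) := by
  induction f generalizing k ns with
  | nil => simp [parentsSweepB]
  | cons x f ih =>
    simp only [parentsSweepB_cons]
    rcases hx : pm.get? x with _ | p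
    · simp only [stepBP, hx]; exact ih k ns
    · simp only [stepBP, hx]
      by_cases hc : p ≠ "" ∧ p ∉ k
      · simp only [if_pos hc]
        rw [ih _ (ns ++ [p]), ih _ ([] ++ [p])]
        simp
      · simp only [if_neg hc]; exact ih k ns

theorem ps_append (pm : PySem.Dict String String) (f : List String) (k : PySem.Set String) :
    (parentsSweepB pm (k, []) f).1 = k ++ (parentsSweepB pm (k, []) f).2 := by
  induction f generalizing k with
  | nil => simp [parentsSweepB]
  | cons x f ih =>
    simp only [parentsSweepB_cons]
    rcases hx : pm.get? x with _ | p
    · simp only [stepBP, hx]; exact ih k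
    · simp only [stepBP, hx]
      by_cases hc : p ≠ "" ∧ p ∉ k
      · simp only [if_pos hc]
        rw [ps_acc, ih, PySem.Set.add_of_not_mem hc.2]
        simp
      · simp only [if_neg hc]; exact ih k

theorem cs_acc (Q : List (String × String)) (k : PySem.Set String)
    (n0 : List String) (s0 : List (String × String)) :
    childrenSweepB (k, n0, s0) Q
      = ((childrenSweepB (k, [], []) Q).1, n0 ++ (childrenSweepB (k, [], []) Q).2.1,
         s0 ++ (childrenSweepB (k, [], []) Q).2.2) := by
  induction Q generalizing k n0 s0 with
  | nil => simp [childrenSweepB]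
  | cons e Q ih =>
    simp only [childrenSweepB_cons]
    by_cases h1 : e.1 ∈ k
    · by_cases h2 : e.2 ∉ k
      · simp only [stepBC, if_pos h1, if_pos h2]
        rw [ih _ (n0 ++ [e.2]) s0, ih _ ([] ++ [e.2]) []]
        simp
      · simp only [stepBC, if_pos h1, if_neg h2]
        exact ih k n0 s0
    · simp only [stepBC, if_neg h1]
      rw [ih _ n0 (s0 ++ [e]), ih _ [] ([] ++ [e])]
      simp

theorem cs_append (Q : List (String × String)) (k : PySem.Set String) :
    (childrenSweepB (k, [], []) Q).1 = k ++ (childrenSweepB (k, [], []) Q).2.1 := by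
  induction Q generalizing k with
  | nil => simp [childrenSweepB]
  | cons e Q ih =>
    simp only [childrenSweepB_cons]
    by_cases h1 : e.1 ∈ k
    · by_cases h2 : e.2 ∉ k
      · simp only [stepBC, if_pos h1, if_pos h2]
        rw [cs_acc, ih, PySem.Set.add_of_not_mem h2]
        simp
      · simp only [stepBC, if_pos h1, if_neg h2]
        exact ih k
    · simp only [stepBC, if_neg h1]
      rw [cs_acc, ih]
      simp

theorem ps_mem (pm : PySem.Dict String String) (f : List String)
    (k : PySem.Set String) (ns : List String) (y : String) (hy : y ∈ k) :
    y ∈ (parentsSweepB pm (k, ns) f).1 := by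
  rw [ps_acc, ps_append]
  exact List.mem_append_left _ hy

theorem cs_mem (Q : List (String × String)) (k : PySem.Set String)
    (n0 : List String) (s0 : List (String × String)) (y : String) (hy : y ∈ k) :
    y ∈ (childrenSweepB (k, n0, s0) Q).1 := by
  rw [cs_acc]
  simp only []
  rw [cs_append]
  exact List.mem_append_left _ hy

-- A's single parent step, seen through B's precomputed map
theorem stepAP_eq (rows : List (List (String × String))) (k : PySem.Set String) (b : Bool)
    (x : String) :
    stepAP (index_rows rows "stop_id") (k, b) x
      = (match (buildMapsB rows).1.get? x with
         | none => (k, b)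
         | some p => if p ≠ "" ∧ p ∉ k then (PySem.Set.add k p, true) else (k, b)) := by
  rw [← lookup_eq rows x]
  rcases hx : (index_rows rows "stop_id").get? x with _ | row
  · simp [stepAP, hx]
  · by_cases hr : row = []
    · simp [stepAP, hx, hr]
    · simp [stepAP, hx, hr]

-- A's parent pass over a snapshot list = B's canonical parent sweep (value + changed-flag)
theorem A_par_eq (rows : List (List (String × String))) (l : List String)
    (k : PySem.Set String) (b : Bool) :
    l.foldl (stepAP (index_rows rows "stop_id")) (k, b)
      = ((parentsSweepB (buildMapsB rows).1 (k, []) l).1,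
         b || !(parentsSweepB (buildMapsB rows).1 (k, []) l).2.isEmpty) := by
  induction l generalizing k b with
  | nil => simp [parentsSweepB]
  | cons x l ih =>
    rw [List.foldl_cons, stepAP_eq, parentsSweepB_cons]
    rcases hx : (buildMapsB rows).1.get? x with _ | p
    · simp only [stepBP, hx]
      exact ih k b
    · simp only [stepBP, hx]
      by_cases hc : p ≠ "" ∧ p ∉ k
      · simp only [if_pos hc]
        rw [ih _ true, ps_acc _ l (PySem.Set.add k p) ([] ++ [p])]
        simp
      · simp only [if_neg hc]
        exact ih k b

-- A's children pass over all rows = the canonical children sweep of the full edge list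
theorem A_ch_eq (rows : List (List (String × String))) (k : PySem.Set String) (b : Bool) :
    rows.foldl stepAC (k, b)
      = ((childrenSweepB (k, [], []) (buildMapsB rows).2).1,
         b || !(childrenSweepB (k, [], []) (buildMapsB rows).2).2.1.isEmpty) := by
  induction rows generalizing k b with
  | nil => simp [buildMapsB, childrenSweepB]
  | cons row rows ih =>
    have hE : (buildMapsB (row :: rows)).2
        = (if PySem.Str.strip (((PySem.Dict.mk row).get? "parent_station").getD "") ≠ ""
           then [(PySem.Str.strip (((PySem.Dict.mk row).get? "parent_station").getD ""),
                  PySem.Str.strip (((PySem.Dict.mk row).get? "stop_id").getD ""))] else [])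
          ++ (buildMapsB rows).2 := by
      show (List.foldl stepBM (stepBM (PySem.Dict.empty, []) row) rows).2 = _
      rw [bm_snd rows _ PySem.Dict.empty]
      by_cases hp : PySem.Str.strip (((PySem.Dict.mk row).get? "parent_station").getD "") = ""
      · simp [stepBM, hp, buildMapsB]
      · simp [stepBM, hp, buildMapsB]
    rw [List.foldl_cons, hE]
    by_cases hp : PySem.Str.strip (((PySem.Dict.mk row).get? "parent_station").getD "") = ""
    · rw [if_neg (by simp [hp])]
      rw [show stepAC (k, b) row = (k, b) by simp [stepAC, normalize_stop_id, hp]]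
      exact ih k b
    · rw [if_pos (by simp [hp]), List.singleton_append, childrenSweepB_cons]
      by_cases h1 : PySem.Str.strip (((PySem.Dict.mk row).get? "parent_station").getD "") ∈ k
      · by_cases h2 : PySem.Str.strip (((PySem.Dict.mk row).get? "stop_id").getD "") ∈ k
        · rw [show stepAC (k, b) row = (k, b) by
            simp only [stepAC, normalize_stop_id]
            rw [if_neg (by simp [h2])]]
          rw [show stepBC (k, ([] : List String), ([] : List (String × String)))
              (PySem.Str.strip (((PySem.Dict.mk row).get? "parent_station").getD ""),
               PySem.Str.strip (((PySem.Dict.mk row).get? "stop_id").getD "")) = (k, [], []) by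
            simp [stepBC, h1, h2]]
          exact ih k b
        · rw [show stepAC (k, b) row
              = (PySem.Set.add k (PySem.Str.strip (((PySem.Dict.mk row).get? "stop_id").getD "")), true) by
            simp only [stepAC, normalize_stop_id]
            rw [if_pos ⟨hp, h1, h2⟩]]
          rw [show stepBC (k, ([] : List String), ([] : List (String × String)))
              (PySem.Str.strip (((PySem.Dict.mk row).get? "parent_station").getD ""),
               PySem.Str.strip (((PySem.Dict.mk row).get? "stop_id").getD ""))
              = (PySem.Set.add k (PySem.Str.strip (((PySem.Dict.mk row).get? "stop_id").getD "")),
                 [] ++ [PySem.Str.strip (((PySem.Dict.mk row).get? "stop_id").getD "")], []) by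
            simp [stepBC, h1, h2]]
          rw [ih _ true,
            cs_acc (buildMapsB rows).2 _ ([] ++ [PySem.Str.strip (((PySem.Dict.mk row).get? "stop_id").getD "")]) []]
          simp
      · rw [show stepAC (k, b) row = (k, b) by
            simp only [stepAC, normalize_stop_id]
            rw [if_neg (by simp [h1])]]
        rw [show stepBC (k, ([] : List String), ([] : List (String × String)))
            (PySem.Str.strip (((PySem.Dict.mk row).get? "parent_station").getD ""),
             PySem.Str.strip (((PySem.Dict.mk row).get? "stop_id").getD ""))
            = (k, [], [] ++ [(PySem.Str.strip (((PySem.Dict.mk row).get? "parent_station").getD ""),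
               PySem.Str.strip (((PySem.Dict.mk row).get? "stop_id").getD ""))]) by
          simp [stepBC, h1]]
        rw [ih k b,
          cs_acc (buildMapsB rows).2 k []
            ([] ++ [(PySem.Str.strip (((PySem.Dict.mk row).get? "parent_station").getD ""),
              PySem.Str.strip (((PySem.Dict.mk row).get? "stop_id").getD ""))])]
        simp

-- scanned prefix contributes nothing to the parent sweep
theorem par_pre (pm : PySem.Dict String String) (pre f : List String) (k : PySem.Set String)
    (h : ∀ x ∈ pre, ParDone pm k x) :
    parentsSweepB pm (k, []) (pre ++ f) = parentsSweepB pm (k, []) f := by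
  induction pre with
  | nil => rfl
  | cons x pre ih =>
    rw [List.cons_append, parentsSweepB_cons]
    have hx := h x (by simp)
    rcases hp : pm.get? x with _ | p
    · rw [show stepBP pm (k, []) x = (k, []) by simp [stepBP, hp]]
      exact ih fun y hy => h y (by simp [hy])
    · rcases hx p hp with h1 | h1
      · rw [show stepBP pm (k, []) x = (k, []) by simp [stepBP, hp, h1]]
        exact ih fun y hy => h y (by simp [hy])
      · rw [show stepBP pm (k, []) x = (k, []) by simp [stepBP, hp, h1]]
        exact ih fun y hy => h y (by simp [hy])

theorem parDone_mono {pm : PySem.Dict String String} {k k' : PySem.Set String} {x : String}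
    (h : ParDone pm k x) (hk : ∀ y, y ∈ k → y ∈ k') : ParDone pm k' x := by
  intro p hp; rcases h p hp with h1 | h1
  · exact Or.inl h1
  · exact Or.inr (hk _ h1)

-- after the parent sweep, every frontier element is done
theorem ps_done (pm : PySem.Dict String String) (f : List String)
    (k : PySem.Set String) (ns : List String) :
    ∀ x ∈ f, ParDone pm (parentsSweepB pm (k, ns) f).1 x := by
  induction f generalizing k ns with
  | nil => intro x hx; cases hx
  | cons y f ih =>
    intro x hx
    rw [parentsSweepB_cons]
    rcases List.mem_cons.mp hx with hx | hx
    swap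
    · rcases hp : pm.get? y with _ | p
      · rw [show stepBP pm (k, ns) y = (k, ns) by simp [stepBP, hp]]
        exact ih k ns x hx
      · simp only [stepBP, hp]
        by_cases hc : p ≠ "" ∧ p ∉ k
        · rw [if_pos hc]; exact ih _ _ x hx
        · rw [if_neg hc]; exact ih k ns x hx
    · subst hx
      rcases hp : pm.get? x with _ | p
      · intro q hq; rw [hp] at hq; cases hq
      · simp only [stepBP, hp]
        by_cases hc : p ≠ "" ∧ p ∉ k
        · rw [if_pos hc]
          intro q hq; rw [hp] at hq; cases hq
          exact Or.inr (ps_mem _ _ _ _ _ (by simp [PySem.Set.mem_add]))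
        · rw [if_neg hc]
          intro q hq; rw [hp] at hq; cases hq
          rcases not_and_or.mp hc with h1 | h1
          · exact Or.inl (not_not.mp (by simpa using h1))
          · exact Or.inr (ps_mem _ _ _ _ _ (not_not.mp h1))

-- core: sweeping the full list L and the surviving list Q agree on keep and new ids,
-- and the survivors of Q stay related to L
theorem sweep_rel (L Q : List (String × String)) (k : PySem.Set String)
    (h : PendRel k L Q) :
    (childrenSweepB (k, [], []) L).1 = (childrenSweepB (k, [], []) Q).1 ∧
    (childrenSweepB (k, [], []) L).2.1 = (childrenSweepB (k, [], []) Q).2.1 ∧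
    PendRel (childrenSweepB (k, [], []) Q).1 L (childrenSweepB (k, [], []) Q).2.2 := by
  induction L generalizing Q k with
  | nil =>
    have hQ : Q = [] := h
    subst hQ
    exact ⟨rfl, rfl, pendRel_refl _ _⟩
  | cons e L ih =>
    rcases h with ⟨he, h⟩ | ⟨Q', rfl, h⟩
    · -- e was dropped earlier, so e.2 ∈ k already
      obtain ⟨E1, E2, R3⟩ := ih Q k h
      have hA1 : (childrenSweepB (k, [], []) (e :: L)).1 = (childrenSweepB (k, [], []) L).1
          ∧ (childrenSweepB (k, [], []) (e :: L)).2.1 = (childrenSweepB (k, [], []) L).2.1 := by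
        rw [childrenSweepB_cons]
        by_cases h1 : e.1 ∈ k
        · rw [show stepBC (k, [], []) e = (k, [], []) by simp [stepBC, h1, he]]
          exact ⟨rfl, rfl⟩
        · rw [show stepBC (k, [], []) e = (k, [], [] ++ [e]) by simp [stepBC, h1]]
          rw [cs_acc L k [] ([] ++ [e])]
          exact ⟨rfl, rfl⟩
      exact ⟨hA1.1.trans E1, hA1.2.trans E2, Or.inl ⟨cs_mem Q k [] [] _ he, R3⟩⟩
    · by_cases h1 : e.1 ∈ k
      · by_cases h2 : e.2 ∈ k
        · -- no-op on both sides
          rw [childrenSweepB_cons, childrenSweepB_cons,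
            show stepBC (k, [], []) e = (k, [], []) by simp [stepBC, h1, h2]]
          obtain ⟨E1, E2, R3⟩ := ih Q' k h
          exact ⟨E1, E2, Or.inl ⟨cs_mem Q' k [] [] _ h2, R3⟩⟩
        · -- fires on both sides
          rw [childrenSweepB_cons, childrenSweepB_cons,
            show stepBC (k, [], []) e = (PySem.Set.add k e.2, [] ++ [e.2], []) by
              simp [stepBC, h1, h2]]
          have h' : PendRel (PySem.Set.add k e.2) L Q' :=
            pendRel_mono (fun x hx => by simp [PySem.Set.mem_add, hx]) h
          obtain ⟨E1, E2, R3⟩ := ih Q' (PySem.Set.add k e.2) h'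
          rw [cs_acc L _ ([] ++ [e.2]) [], cs_acc Q' _ ([] ++ [e.2]) []]
          simp only [List.nil_append]
          refine ⟨E1, by rw [E2], Or.inl ⟨?_, R3⟩⟩
          exact cs_mem Q' _ [] [] _ (by simp [PySem.Set.mem_add])
      · -- goes to still on both sides
        rw [childrenSweepB_cons, childrenSweepB_cons,
          show stepBC (k, [], []) e = (k, [], [] ++ [e]) by simp [stepBC, h1]]
        rw [cs_acc L k [] ([] ++ [e]), cs_acc Q' k [] ([] ++ [e])]
        obtain ⟨E1, E2, R3⟩ := ih Q' k h
        simp only [List.nil_append]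
        exact ⟨E1, E2, Or.inr ⟨(childrenSweepB (k, [], []) Q').2.2, rfl, R3⟩⟩

-- the main bisimulation, by induction on fuel
theorem loop_eq (rows : List (List (String × String))) (fuel : Nat)
    (pre front : List String) (Q : List (String × String))
    (h1 : ∀ x ∈ pre, ParDone (buildMapsB rows).1 (pre ++ front) x)
    (h2 : PendRel (pre ++ front) (buildMapsB rows).2 Q) :
    loopA fuel (index_rows rows "stop_id") rows (pre ++ front)
      = loopB fuel (buildMapsB rows).1 (pre ++ front) front Q := by
  induction fuel generalizing pre front Q with
  | zero => rfl
  | succ fuel ih =>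
    have hP : addMissingParentsA (pre ++ front) (index_rows rows "stop_id")
        = ((parentsSweepB (buildMapsB rows).1 (pre ++ front, []) front).1,
           !(parentsSweepB (buildMapsB rows).1 (pre ++ front, []) front).2.isEmpty) := by
      unfold addMissingParentsA
      rw [A_par_eq rows (pre ++ front) (pre ++ front) false,
        par_pre (buildMapsB rows).1 pre front (pre ++ front) h1]
      simp
    have hk1 := ps_append (buildMapsB rows).1 front (pre ++ front)
    have hC : addMissingChildrenA
          (parentsSweepB (buildMapsB rows).1 (pre ++ front, []) front).1 rows
        = ((childrenSweepB ((parentsSweepB (buildMapsB rows).1 (pre ++ front, []) front).1, [], [])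
              (buildMapsB rows).2).1,
           !(childrenSweepB ((parentsSweepB (buildMapsB rows).1 (pre ++ front, []) front).1, [], [])
              (buildMapsB rows).2).2.1.isEmpty) := by
      unfold addMissingChildrenA
      rw [A_ch_eq rows _ false]
      simp
    have hrel1 : PendRel (parentsSweepB (buildMapsB rows).1 (pre ++ front, []) front).1
        (buildMapsB rows).2 Q :=
      pendRel_mono (fun x hx => by rw [hk1]; exact List.mem_append_left _ hx) h2
    obtain ⟨E1, E2, R3⟩ := sweep_rel (buildMapsB rows).2 Q _ hrel1
    have hk2 := cs_append Q (parentsSweepB (buildMapsB rows).1 (pre ++ front, []) front).1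
    have hCeq : (childrenSweepB ((parentsSweepB (buildMapsB rows).1 (pre ++ front, []) front).1, [], []) Q).1 = (pre ++ front) ++ ((parentsSweepB (buildMapsB rows).1 (pre ++ front, []) front).2 ++ (childrenSweepB ((parentsSweepB (buildMapsB rows).1 (pre ++ front, []) front).1, [], []) Q).2.1) := by
      rw [hk2, hk1, List.append_assoc]
    have hfin : loopA fuel (index_rows rows "stop_id") rows (childrenSweepB ((parentsSweepB (buildMapsB rows).1 (pre ++ front, []) front).1, [], []) Q).1
        = loopB fuel (buildMapsB rows).1 (childrenSweepB ((parentsSweepB (buildMapsB rows).1 (pre ++ front, []) front).1, [], []) Q).1 ((parentsSweepB (buildMapsB rows).1 (pre ++ front, []) front).2 ++ (childrenSweepB ((parentsSweepB (buildMapsB rows).1 (pre ++ front, []) front).1, [], []) Q).2.1) (childrenSweepB ((parentsSweepB (buildMapsB rows).1 (pre ++ front, []) front).1, [], []) Q).2.2 := by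
      rw [hCeq]
      exact ih (pre ++ front) ((parentsSweepB (buildMapsB rows).1 (pre ++ front, []) front).2 ++ (childrenSweepB ((parentsSweepB (buildMapsB rows).1 (pre ++ front, []) front).1, [], []) Q).2.1) (childrenSweepB ((parentsSweepB (buildMapsB rows).1 (pre ++ front, []) front).1, [], []) Q).2.2
        (by
          intro x hx
          rw [← hCeq]
          rcases List.mem_append.mp hx with hx | hx
          · refine parDone_mono (h1 x hx) ?_
            intro y hy
            rw [hCeq]; exact List.mem_append_left _ hy
          · refine parDone_mono (ps_done (buildMapsB rows).1 front (pre ++ front) [] x hx) ?_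
            intro y hy
            rw [hk2]; exact List.mem_append_left _ hy)
        (by rw [← hCeq]; exact R3)
    show loopA (Nat.succ fuel) _ rows _ = loopB (Nat.succ fuel) _ _ front Q
    rw [loopA, loopB]
    simp only [hP, hC, E1, E2, cs_acc Q (parentsSweepB (buildMapsB rows).1 (pre ++ front, []) front).1 (parentsSweepB (buildMapsB rows).1 (pre ++ front, []) front).2 [], List.nil_append]
    by_cases hnp : (parentsSweepB (buildMapsB rows).1 (pre ++ front, []) front).2 = []
    · by_cases hch : (childrenSweepB ((parentsSweepB (buildMapsB rows).1 (pre ++ front, []) front).1, [], []) Q).2.1 = []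
      · rw [if_neg (by simp [hnp, hch]), if_pos (by simp [hnp, hch])]
      · rw [if_pos (by simp [hch]), if_neg (by simp [hch])]
        exact hfin
    · rw [if_pos (by simp [hnp]), if_neg (by simp [hnp])]
      exact hfin

-- ===== VERDICT (by name: the statement is the Claim_ definition above) =====
theorem add_parent_and_child_stops_spec : Claim_equal_add_parent_and_child_stops := by
  intro initial_ids stops_rows _
  unfold Spec_add_parent_and_child_stops add_parent_and_child_stops add_parent_and_child_stops_alt
  have := loop_eq stops_rows (2 * stops_rows.length + 1) [] (PySem.Set.ofList initial_ids)
    (buildMapsB stops_rows).2 (by intro x hx; cases hx)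
    (by simpa using pendRel_refl _ _)
  simpa using this
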